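-- pv_equiv track=rewrite | github.com/jaswanthmanda/dsa | 9.ia/11.find_non_repeating_numbers.py | findNonRepeatingBruteForce
-- ===== SOURCE A (Python) =====
-- def findNonRepeatingBruteForce(arr):
--     # Return a list of 2 integers
--     # Write your code here
--     # sort the list
--     n = len(arr)
--
--     if n in [0, 1, 2]:
--         return arr
--
--     arr.sort()
--
--     res = []
--
--     if arr[0] != arr[1]:
--         res.append(arr[0])
--
--     for i in range(1, n - 1):
--         if arr[i] != arr[i - 1] and arr[i + 1] != arr[i]:
--             res.append(arr[i])
--
--     if arr[n - 2] != arr[n - 1]: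
--         res.append(arr[n - 1])
--
--     return res
-- ===== SOURCE B (Python) =====
-- def findNonRepeatingBruteForce(arr):
--     if len(arr) <= 2:
--         return arr
--     arr.sort()
--     counts = {}
--     for x in arr:
--         counts[x] = counts.get(x, 0) + 1
--     return [x for x in arr if counts[x] == 1]
-- ===== Notes on version B (the rewrite author's own statement) =====
-- stated objective: simpler
-- what changed: Replaces A's three boundary cases plus interior neighbour-comparison index loop over the sorted list with a single frequency-table build followed by a count==1 filter over the sorted list.
import Mathlib
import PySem

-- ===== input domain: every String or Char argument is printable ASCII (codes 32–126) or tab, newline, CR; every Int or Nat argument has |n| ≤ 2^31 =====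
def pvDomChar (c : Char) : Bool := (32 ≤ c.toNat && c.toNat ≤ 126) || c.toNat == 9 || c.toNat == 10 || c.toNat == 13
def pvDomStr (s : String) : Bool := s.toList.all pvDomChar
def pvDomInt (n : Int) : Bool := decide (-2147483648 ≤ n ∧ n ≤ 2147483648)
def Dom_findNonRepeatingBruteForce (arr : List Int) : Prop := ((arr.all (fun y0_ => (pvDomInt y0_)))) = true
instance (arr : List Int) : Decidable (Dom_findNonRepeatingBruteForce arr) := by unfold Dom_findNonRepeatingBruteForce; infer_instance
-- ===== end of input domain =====

-- B replaces A's three boundary cases plus interior neighbour-comparison loop by a frequency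
-- table followed by a count==1 filter over the sorted list (objective: simpler).
-- Note: both A and B sort `arr` in place when len(arr) >= 3; the theorems below are about the
-- return value only (the in-place mutation is identical in A and B).

-- ===== PORT A =====
def findNonRepeatingBruteForce (arr : List Int) : List Int :=
  let n : Int := arr.length
  if n = 0 ∨ n = 1 ∨ n = 2 then arr
  else
    let s := PySem.List.sorted arr (fun x => x) false
    let res : List Int := []
    let res := if PySem.List.pyGetD s 0 0 ≠ PySem.List.pyGetD s 1 0
      then res ++ [PySem.List.pyGetD s 0 0] else res
    let res := (PySem.List.pyRange 1 (n-1) 1).foldl (fun res i =>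
      if PySem.List.pyGetD s i 0 ≠ PySem.List.pyGetD s (i-1) 0 ∧
         PySem.List.pyGetD s (i+1) 0 ≠ PySem.List.pyGetD s i 0
      then res ++ [PySem.List.pyGetD s i 0] else res) res
    let res := if PySem.List.pyGetD s (n-2) 0 ≠ PySem.List.pyGetD s (n-1) 0
      then res ++ [PySem.List.pyGetD s (n-1) 0] else res
    res

-- ===== PORT B =====
def findNonRepeatingBruteForce_alt (arr : List Int) : List Int :=
  if arr.length ≤ 2 then arr
  else
    let s := PySem.List.sorted arr (fun x => x) false
    let counts : PySem.Dict Int Int :=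
      s.foldl (fun d x => d.insert x (d.getD x 0 + 1)) PySem.Dict.empty
    s.filter (fun x => counts.getD x 0 == 1)

-- ===== PRECONDITION & SPEC =====
def Spec_findNonRepeatingBruteForce (arr : List Int) (out : List Int) : Prop := out = findNonRepeatingBruteForce_alt arr
instance (arr : List Int) (out : List Int) : Decidable (Spec_findNonRepeatingBruteForce arr out) := by unfold Spec_findNonRepeatingBruteForce; infer_instance

-- ===== CLAIM (what is proved, stated in full; the proofs are below) =====
def Claim_equal_findNonRepeatingBruteForce : Prop := ∀ (arr : List Int), Dom_findNonRepeatingBruteForce arr → Spec_findNonRepeatingBruteForce arr (findNonRepeatingBruteForce arr)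

-- ===== LEMMAS AND PROOFS =====
theorem sorted_mono (s : List Int) (hs : s.Pairwise (· ≤ ·)) {i j : Nat}
    (hj : j < s.length) (hij : i ≤ j) : s[i]'(by omega) ≤ s[j] := by
  rw [List.pairwise_iff_getElem] at hs
  rcases Nat.eq_or_lt_of_le hij with h | h
  · subst h; exact le_refl _
  · exact hs i j (by omega) hj h

theorem mem_take_iff (s : List Int) (hs : s.Pairwise (· ≤ ·)) (k : Nat) (hk : k < s.length) :
    s[k] ∈ s.take k ↔ (0 < k ∧ s.getD (k-1) 0 = s[k]) := by
  constructor
  · intro hmem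
    obtain ⟨j, hj, hval⟩ := List.mem_iff_getElem.mp hmem
    rw [List.length_take] at hj
    have hjk : j < k := lt_of_lt_of_le hj (min_le_left _ _)
    rw [List.getElem_take] at hval
    refine ⟨by omega, ?_⟩
    rw [List.getD_eq_getElem s 0 (by omega)]
    have h1 : s[j]'(by omega) ≤ s[k-1]'(by omega) := sorted_mono s hs (by omega) (by omega)
    have h2 : s[k-1]'(by omega) ≤ s[k] := sorted_mono s hs hk (by omega)
    omega
  · rintro ⟨h0, heq⟩
    rw [List.getD_eq_getElem s 0 (by omega)] at heq
    rw [← heq]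
    exact List.mem_take_iff_getElem.mpr ⟨k-1, by omega, rfl⟩

theorem mem_drop_iff (s : List Int) (hs : s.Pairwise (· ≤ ·)) (k : Nat) (hk : k < s.length) :
    s[k] ∈ s.drop (k+1) ↔ (k+1 < s.length ∧ s.getD (k+1) 0 = s[k]) := by
  constructor
  · intro hmem
    obtain ⟨j, hj, hval⟩ := List.mem_iff_getElem.mp hmem
    rw [List.length_drop] at hj
    rw [List.getElem_drop] at hval
    have hlen : k+1 < s.length := by omega
    refine ⟨hlen, ?_⟩
    rw [List.getD_eq_getElem s 0 (by omega)]
    have h1 : s[k+1]'hlen ≤ s[k+1+j]'(by omega) := sorted_mono s hs (by omega) (by omega)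
    have h2 : s[k] ≤ s[k+1]'hlen := sorted_mono s hs hlen (by omega)
    omega
  · rintro ⟨hlen, heq⟩
    rw [List.getD_eq_getElem s 0 (by omega)] at heq
    rw [← heq]
    exact List.mem_drop_iff_getElem.mpr ⟨0, by omega, by simp⟩

theorem decomp (s : List Int) (k : Nat) (hk : k < s.length) :
    s.take k ++ s[k] :: s.drop (k+1) = s := by
  rw [List.getElem_cons_drop, List.take_append_drop]

theorem cnt_split (s : List Int) (k : Nat) (hk : k < s.length) :
    s.count s[k] = (s.take k).count s[k] + 1 + (s.drop (k+1)).count s[k] := by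
  conv_lhs => rw [show s.count s[k] = (s.take k ++ s[k] :: s.drop (k+1)).count s[k] from by
    rw [decomp s k hk]]
  rw [List.count_append, List.count_cons_self]
  omega

theorem count_eq_one_iff (s : List Int) (hs : s.Pairwise (· ≤ ·)) (k : Nat) (hk : k < s.length) :
    (s.count s[k] = 1) ↔
      (¬(0 < k ∧ s.getD (k-1) 0 = s[k]) ∧ ¬(k+1 < s.length ∧ s.getD (k+1) 0 = s[k])) := by
  rw [← mem_take_iff s hs k hk, ← mem_drop_iff s hs k hk, cnt_split s k hk]
  constructor
  · intro h
    constructor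
    · intro hm; have := List.count_pos_iff.mpr hm; omega
    · intro hm; have := List.count_pos_iff.mpr hm; omega
  · rintro ⟨h1, h2⟩
    rw [List.count_eq_zero.mpr h1, List.count_eq_zero.mpr h2]

theorem count_one_getD (s : List Int) (hs : s.Pairwise (· ≤ ·)) (k : Nat) (hk : k < s.length) :
    ((List.count (s.getD k 0) s == 1) = true) ↔
      ((0 < k → s.getD (k-1) 0 ≠ s.getD k 0) ∧ (k+1 < s.length → s.getD (k+1) 0 ≠ s.getD k 0)) := by
  rw [List.getD_eq_getElem s 0 hk, beq_iff_eq]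
  rw [show List.count s[k] s = s.count s[k] from rfl]
  rw [count_eq_one_iff s hs k hk]
  constructor
  · rintro ⟨h1, h2⟩
    exact ⟨fun h0 he => h1 ⟨h0, he⟩, fun hl he => h2 ⟨hl, he⟩⟩
  · rintro ⟨h1, h2⟩
    exact ⟨fun ⟨h0, he⟩ => h1 h0 he, fun ⟨hl, he⟩ => h2 hl he⟩

theorem filter_eq_flatMap (s : List Int) (p : Int → Bool) :
    s.filter p = (List.range s.length).flatMap
      (fun k => if p (s.getD k 0) then [s.getD k 0] else []) := by
  induction s with
  | nil => simp
  | cons x xs ih =>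
    rw [List.length_cons, List.range_succ_eq_map, List.flatMap_cons, List.flatMap_map]
    simp only [List.getD_cons_zero, List.getD_cons_succ]
    rw [← ih]
    cases hp : p x <;> simp [hp]

theorem foldl_body_flat (s : List Int) (res : List Int) (l : List Int) :
    l.foldl (fun res i =>
      if PySem.List.pyGetD s i 0 ≠ PySem.List.pyGetD s (i-1) 0 ∧
         PySem.List.pyGetD s (i+1) 0 ≠ PySem.List.pyGetD s i 0
      then res ++ [PySem.List.pyGetD s i 0] else res) res
    = res ++ l.flatMap (fun i =>
      if PySem.List.pyGetD s i 0 ≠ PySem.List.pyGetD s (i-1) 0 ∧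
         PySem.List.pyGetD s (i+1) 0 ≠ PySem.List.pyGetD s i 0
      then [PySem.List.pyGetD s i 0] else []) := by
  rw [PySem.List.foldl_congr_mem (g := fun res i => res ++
      (if PySem.List.pyGetD s i 0 ≠ PySem.List.pyGetD s (i-1) 0 ∧
          PySem.List.pyGetD s (i+1) 0 ≠ PySem.List.pyGetD s i 0
       then [PySem.List.pyGetD s i 0] else []))]
  · rw [PySem.List.foldl_append_eq_flatMap]
  · intro acc x _; split <;> simp

theorem B_as_count (arr : List Int) (h : ¬ arr.length ≤ 2) :
    findNonRepeatingBruteForce_alt arr = (PySem.List.sorted arr (fun x => x) false).filter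
      (fun x => List.count x (PySem.List.sorted arr (fun x => x) false) == 1) := by
  unfold findNonRepeatingBruteForce_alt
  rw [if_neg h]
  apply List.filter_congr
  intro x _
  rw [PySem.Dict.foldl_insert_getD_add_one_eq_counter, PySem.Dict.getD_counter]
  simp

theorem if_eq_of_iff {P : Prop} [Decidable P] {b : Bool} (h : P ↔ (b = true)) (l : List Int) :
    (if P then l else []) = (if b then l else []) := by
  by_cases hp : P
  · rw [if_pos hp, if_pos (h.mp hp)]
  · rw [if_neg hp, if_neg (fun hb => hp (h.mpr hb))]

theorem range_split (m : Nat) (f : Nat → List Int) :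
    (List.range (m+3)).flatMap f
      = f 0 ++ (List.range (m+1)).flatMap (fun k => f (k+1)) ++ f (m+2) := by
  rw [show m+3 = (m+2)+1 from rfl, List.range_succ, List.flatMap_append]
  rw [show m+2 = (m+1)+1 from rfl, List.range_succ_eq_map, List.flatMap_cons, List.flatMap_map]
  simp [Nat.succ_eq_add_one, List.append_assoc]

theorem if_append (C : Prop) [Decidable C] (X g : List Int) :
    (if C then X ++ g else X) = X ++ (if C then g else []) := by
  split <;> simp

theorem ab_eq (arr : List Int) : findNonRepeatingBruteForce arr = findNonRepeatingBruteForce_alt arr := by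
  by_cases h : arr.length ≤ 2
  · unfold findNonRepeatingBruteForce findNonRepeatingBruteForce_alt
    rw [if_pos (by omega), if_pos h]
  · rw [B_as_count arr h]
    unfold findNonRepeatingBruteForce
    rw [if_neg (by omega)]
    simp only []
    obtain ⟨m, hm⟩ : ∃ m, (PySem.List.sorted arr (fun x => x) false).length = m + 3 :=
      ⟨arr.length - 3, by rw [PySem.List.length_sorted]; omega⟩
    set s := PySem.List.sorted arr (fun x => x) false with hsdef
    have hs : s.Pairwise (· ≤ ·) := by
      have := PySem.List.sorted_pairwise arr (fun x => x)
      simpa using this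
    have hlen : (arr.length : Int) = ((m+3 : Nat) : Int) := by
      rw [← PySem.List.length_sorted arr (fun x => x) false, ← hsdef, hm]
    rw [foldl_body_flat]
    rw [hlen]
    rw [show ((m+3:Nat):Int) - 1 = (1 : Int) + (m+1:Nat) from by push_cast; ring]
    rw [show ((m+3:Nat):Int) - 2 = ((m+1:Nat):Int) from by push_cast; ring]
    rw [show (1:Int) + ((m+1:Nat):Int) = ((m+2:Nat):Int) from by push_cast; ring]
    rw [PySem.List.pyRange_one]
    rw [show (((m+2:Nat):Int) - 1).toNat = m + 1 from by omega]
    rw [List.flatMap_map]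
    rw [List.flatMap_congr (g := fun (k : Nat) =>
      if s.getD (k+1) 0 ≠ s.getD k 0 ∧ s.getD (k+2) 0 ≠ s.getD (k+1) 0
      then [s.getD (k+1) 0] else []) (by
      intro k _
      rw [show (1:Int) + (k:Int) = ((k+1:Nat):Int) from by push_cast; ring]
      rw [show ((k+1:Nat):Int) - 1 = ((k:Nat):Int) from by push_cast; ring]
      rw [show ((k+1:Nat):Int) + 1 = ((k+2:Nat):Int) from by push_cast; ring]
      simp only [PySem.List.pyGetD_natCast])]
    simp only [PySem.List.pyGetD_natCast, PySem.List.pyGetD_ofNat',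
      List.nil_append]
    rw [filter_eq_flatMap s (fun x => List.count x s == 1), hm, range_split]
    rw [if_append]
    congr 1
    congr 1
    · apply if_eq_of_iff
      rw [count_one_getD s hs 0 (by omega)]
      constructor
      · intro hne
        exact ⟨fun h0 => absurd h0 (by omega), fun _ => Ne.symm hne⟩
      · rintro ⟨_, h2⟩
        exact Ne.symm (h2 (by omega))
    · apply List.flatMap_congr
      intro k hk
      rw [List.mem_range] at hk
      apply if_eq_of_iff
      rw [count_one_getD s hs (k+1) (by omega)]
      constructor
      · rintro ⟨h1, h2⟩
        exact ⟨fun _ => Ne.symm h1, fun _ => h2⟩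
      · rintro ⟨h1, h2⟩
        exact ⟨Ne.symm (h1 (by omega)), h2 (by omega)⟩
    · apply if_eq_of_iff
      rw [count_one_getD s hs (m+2) (by omega)]
      constructor
      · intro hne
        exact ⟨fun _ => hne, fun hl => absurd hl (by omega)⟩
      · rintro ⟨h1, _⟩
        exact h1 (by omega)

-- ===== VERDICT (by name: the statement is the Claim_ definition above) =====
theorem findNonRepeatingBruteForce_spec : Claim_equal_findNonRepeatingBruteForce := by
  intro arr _
  unfold Spec_findNonRepeatingBruteForce
  exact ab_eq arr
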